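-- pv_equiv track=rewrite | github.com/wafflejuice/problem-solving-practice | programmers/kakao-blind-2018-3/5_자동완성.py | check
-- ===== SOURCE A (Python) =====
-- def check(words):
--     tot_cnt = 0
--     for word in words:
--         cnt = 0
--         for char_i in range(len(word)):
--             cnt += 1
--             candidates = []
--             for candi_i in range(len(words)):
--                 if char_i < len(words[candi_i]) and word[char_i] == words[candi_i][char_i]:
--                     candidates.append(words[candi_i])
--             if len(candidates) <= 1:
--                 break
--         tot_cnt += cnt
--     return tot_cnt
-- ===== SOURCE B (Python) =====
-- def check(words):
--     # one pass builds a (position, char) -> frequency table; each word then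
--     # scans with O(1) lookups instead of rescanning all words per character
--     freq = {}
--     for w in words:
--         for i, ch in enumerate(w):
--             key = (i, ch)
--             freq[key] = freq.get(key, 0) + 1
--     tot_cnt = 0
--     for w in words:
--         cnt = 0
--         for i, ch in enumerate(w):
--             cnt += 1
--             if freq[(i, ch)] <= 1:
--                 break
--         tot_cnt += cnt
--     return tot_cnt
-- ===== Notes on version B (the rewrite author's own statement) =====
-- stated objective: faster
-- what changed: Replaced the inner rescan of all words per typed character by a (position, char) -> frequency dict built in one pass, so each word is scanned with O(1) lookups.
import Mathlib
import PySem

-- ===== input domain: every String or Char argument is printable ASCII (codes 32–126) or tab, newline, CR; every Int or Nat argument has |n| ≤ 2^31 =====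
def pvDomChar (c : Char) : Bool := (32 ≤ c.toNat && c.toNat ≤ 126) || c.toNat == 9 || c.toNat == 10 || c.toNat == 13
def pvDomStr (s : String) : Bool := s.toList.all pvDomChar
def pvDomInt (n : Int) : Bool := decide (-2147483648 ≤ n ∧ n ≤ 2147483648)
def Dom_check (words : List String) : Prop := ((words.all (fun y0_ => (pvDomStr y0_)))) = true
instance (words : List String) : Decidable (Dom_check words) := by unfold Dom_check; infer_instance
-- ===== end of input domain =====

-- B builds a (position, char) -> frequency table once, removing A's inner rescan of all words (faster, asymptotic).

-- ===== PORT A =====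
-- inner loop of A over char_i (break ported as stopping the recursion)
def checkInnerA (ws : List (List Char)) (i : Nat) (rest : List Char) (cnt : Int) : Int :=
  match rest with
  | [] => cnt
  | c :: rs =>
    let cnt := cnt + 1
    let candidates := ws.foldl
      (fun acc cand => if i < cand.length ∧ cand[i]? = some c then acc ++ [cand] else acc) []
    if candidates.length ≤ 1 then cnt else checkInnerA ws (i + 1) rs cnt

def check (words : List String) : Int :=
  let ws := words.map String.toList
  ws.foldl (fun tot w => tot + checkInnerA ws 0 w 0) 0

-- ===== PORT B =====
-- frequency table: (position, char) -> number of words with that char at that position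
def checkFreqB (ws : List (List Char)) : PySem.Dict (Int × Char) Int :=
  ws.foldl
    (fun d w => (PySem.List.enumerate w 0).foldl
      (fun d p => d.insert p (d.getD p 0 + 1)) d)
    PySem.Dict.empty

-- inner loop of B over enumerate(w) (break ported as stopping the recursion)
def checkInnerB (freq : PySem.Dict (Int × Char) Int) (rest : List (Int × Char)) (cnt : Int) : Int :=
  match rest with
  | [] => cnt
  | p :: rs =>
    let cnt := cnt + 1
    if freq.getD p 0 ≤ 1 then cnt else checkInnerB freq rs cnt

def check_alt (words : List String) : Int :=
  let ws := words.map String.toList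
  let freq := checkFreqB ws
  ws.foldl (fun tot w => tot + checkInnerB freq (PySem.List.enumerate w 0) 0) 0

-- ===== PRECONDITION & SPEC =====
def Spec_check (words : List String) (out : Int) : Prop := out = check_alt words
instance (words : List String) (out : Int) : Decidable (Spec_check words out) := by unfold Spec_check; infer_instance

-- ===== CLAIM (what is proved, stated in full; the proofs are below) =====
def Claim_equal_check : Prop := ∀ (words : List String), Dom_check words → Spec_check words (check words)

-- ===== LEMMAS AND PROOFS =====

-- occurrences of (s+i, c) in enumerate w s: at most one, present iff w[i]? = c
lemma count_enumerate (w : List Char) (s : Int) (i : Nat) (c : Char) :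
    (PySem.List.enumerate w s).count (s + i, c) = if w[i]? = some c then 1 else 0 := by
  induction w generalizing s i with
  | nil => simp [PySem.List.enumerate_nil]
  | cons x xs ih =>
    rw [PySem.List.enumerate_cons, List.count_cons]
    cases i with
    | zero =>
      have hnot : ((s + (0 : Nat), c) : Int × Char) ∉ PySem.List.enumerate xs (s + 1) := by
        intro hmem
        rcases (PySem.List.mem_enumerate_iff _ _ _).1 hmem with ⟨k, hk, hp⟩
        have : s + (0 : Nat) = s + 1 + k := congrArg Prod.fst hp
        omega
      rw [List.count_eq_zero_of_not_mem hnot]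
      by_cases hc : x = c <;> simp [hc]
    | succ j =>
      have : (s : Int) + (j + 1 : Nat) = (s + 1) + (j : Nat) := by push_cast; ring
      rw [this, ih (s + 1) j]
      have hcond : ¬((s : Int) = s + 1 + (j : Nat) ∧ x = c) := by
        rintro ⟨h, -⟩; omega
      simp [hcond]

-- the frequency table equals a count over the flattened enumerations
lemma checkFreqB_getD (ws : List (List Char)) (i : Nat) (c : Char) :
    (checkFreqB ws).getD ((i : Int), c) 0
      = ((ws.countP (fun w => w[i]? == some c) : Nat) : Int) := by
  unfold checkFreqB
  induction ws using List.reverseRecOn with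
  | nil => simp [PySem.Dict.getD_empty, List.countP_nil]
  | append_singleton xs w ih =>
    rw [List.foldl_append, List.foldl_cons, List.foldl_nil,
        PySem.Dict.getD_foldl_insert_add_one, ih, List.countP_append]
    have := count_enumerate w 0 i c
    rw [zero_add] at this
    rw [this]
    by_cases h : w[i]? = some c <;> simp [h]

-- A's candidates list has length = that same count
lemma candidates_length (ws : List (List Char)) (i : Nat) (c : Char) :
    (ws.foldl (fun acc cand =>
        if i < cand.length ∧ cand[i]? = some c then acc ++ [cand] else acc) []).length
      = ws.countP (fun w => w[i]? == some c) := by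
  rw [PySem.List.foldl_append_ite_eq_filter]
  simp only [List.nil_append]
  rw [← List.countP_eq_length_filter]
  apply List.countP_congr
  intro w _
  constructor
  · intro h
    have := of_decide_eq_true h
    simpa using this.2
  · intro h
    have hc : w[i]? = some c := by simpa using h
    have hl : i < w.length := by
      by_contra hge
      rw [List.getElem?_eq_none (by omega : w.length ≤ i)] at hc
      simp at hc
    exact decide_eq_true ⟨hl, hc⟩

-- the two inner loops agree, step for step
lemma inner_eq (ws : List (List Char)) (rest : List Char) :
    ∀ (i : Nat) (cnt : Int),
      checkInnerA ws i rest cnt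
        = checkInnerB (checkFreqB ws) (PySem.List.enumerate rest (i : Int)) cnt := by
  induction rest with
  | nil => intro i cnt; simp [checkInnerA, PySem.List.enumerate_nil, checkInnerB]
  | cons c rs ih =>
    intro i cnt
    rw [PySem.List.enumerate_cons]
    show (let cnt' := cnt + 1;
      let candidates := ws.foldl (fun acc cand =>
        if i < cand.length ∧ cand[i]? = some c then acc ++ [cand] else acc) [];
      if candidates.length ≤ 1 then cnt' else checkInnerA ws (i + 1) rs cnt') = _
    simp only [checkInnerB]
    have hlen := candidates_length ws i c
    have hfreq := checkFreqB_getD ws i c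
    by_cases hbr : ws.countP (fun w => w[i]? == some c) ≤ 1
    · rw [if_pos (by rw [hlen]; exact hbr), if_pos (by rw [hfreq]; exact_mod_cast hbr)]
    · rw [if_neg (by rw [hlen]; exact hbr), if_neg (by rw [hfreq]; exact_mod_cast hbr)]
      have : ((i : Int) + 1) = ((i + 1 : Nat) : Int) := by push_cast; ring
      rw [this]
      exact ih (i + 1) (cnt + 1)

-- ===== VERDICT (by name: the statement is the Claim_ definition above) =====
theorem check_spec : Claim_equal_check := by
  intro words _
  unfold Spec_check check check_alt
  apply PySem.List.foldl_congr_mem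
  intro acc w _
  rw [inner_eq (words.map String.toList) w 0]
  norm_num
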